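-- pv_equiv track=rewrite | github.com/tjacek/ts_ensemble | dtw/separ.py | get_cats_clos
-- ===== SOURCE A (Python) =====
-- def get_cats_clos(cats):
--     n_cats=len(cats.keys())
--     cats_clos={i:[] for i in range(n_cats)}
--     for i in range(n_cats):
--         for j in range(n_cats):
--             if(i!=j):
--                 cats_clos[i]+=cats[j]
--     return cats_clos
-- ===== SOURCE B (Python) =====
-- def get_cats_clos(cats):
--     n = len(cats)
--     if n < 2:
--         return {i: [] for i in range(n)}
--     blocks = [cats[i] for i in range(n)]
--     total = [x for b in blocks for x in b]
--     res = {}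
--     off = 0
--     for i in range(n):
--         m = len(blocks[i])
--         res[i] = total[:off] + total[off + m:]
--         off += m
--     return res
-- ===== Notes on version B (the rewrite author's own statement) =====
-- stated objective: alternative
-- what changed: Instead of A's nested loops that re-append every other category's list into each entry, B concatenates all blocks once into a single total list with running prefix-sum offsets and produces each key's value by slicing its own block out of total (total[:off]+total[off+len:]).
import Mathlib
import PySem

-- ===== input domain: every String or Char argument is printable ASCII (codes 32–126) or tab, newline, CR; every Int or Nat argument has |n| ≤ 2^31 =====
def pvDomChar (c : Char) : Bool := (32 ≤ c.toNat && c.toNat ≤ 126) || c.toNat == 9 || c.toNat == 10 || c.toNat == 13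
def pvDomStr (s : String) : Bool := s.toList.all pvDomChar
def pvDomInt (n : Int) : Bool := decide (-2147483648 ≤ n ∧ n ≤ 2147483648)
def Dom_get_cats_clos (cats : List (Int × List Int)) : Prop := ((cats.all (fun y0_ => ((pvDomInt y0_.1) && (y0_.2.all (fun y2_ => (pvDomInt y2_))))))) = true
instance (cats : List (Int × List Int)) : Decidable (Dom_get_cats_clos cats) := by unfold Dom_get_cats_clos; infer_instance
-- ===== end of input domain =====

-- B builds the full concatenation once and slices each key's own block out of it
-- (one pass over the blocks plus one take/drop per key) instead of A's nested
-- quadratic re-concatenation loops; objective: alternative.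

-- ===== PORT A =====
def get_cats_clos (cats : List (Int × List Int)) : List (Int × List Int) :=
  let d : PySem.Dict Int (List Int) := PySem.Dict.ofList cats
  let n : Int := (d.keys.length : Int)
  let cats_clos0 : PySem.Dict Int (List Int) :=
    (PySem.List.pyRange 0 n).foldl (fun acc i => acc.insert i []) PySem.Dict.empty
  let final : PySem.Dict Int (List Int) :=
    (PySem.List.pyRange 0 n).foldl (fun cc i =>
      (PySem.List.pyRange 0 n).foldl (fun cc2 j =>
        if i ≠ j then cc2.modify i [] (fun v => v ++ d.getD j []) else cc2) cc) cats_clos0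
  final.items

-- ===== PORT B =====
def get_cats_clos_alt (cats : List (Int × List Int)) : List (Int × List Int) :=
  let d : PySem.Dict Int (List Int) := PySem.Dict.ofList cats
  let n : Nat := d.size
  if n < 2 then (List.range n).map (fun (i : Nat) => ((i : Int), ([] : List Int))) else
  let blocks : List (List Int) := (List.range n).map (fun (i : Nat) => d.getD (i : Int) [])
  let total : List Int := blocks.flatten
  ((List.range n).foldl
    (fun (st : Nat × List (Int × List Int)) i =>
      (st.1 + (blocks.getD i []).length,
       st.2 ++ [((i : Int), total.take st.1 ++ total.drop (st.1 + (blocks.getD i []).length))]))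
    (0, [])).2

-- ===== PRECONDITION & SPEC =====
-- Pre_ excludes exactly the inputs where Python A raises KeyError: with two or more
-- keys, every integer 0 .. len(cats)-1 must be a key (cats[j] is looked up for each
-- such j); with zero or one key nothing is looked up and A always returns.
def Pre_get_cats_clos (cats : List (Int × List Int)) : Prop :=
  (PySem.Dict.ofList cats).size ≤ 1 ∨
  ∀ j ∈ List.range (PySem.Dict.ofList cats).size,
    (PySem.Dict.ofList cats).contains ((j : Nat) : Int) = true
instance (cats : List (Int × List Int)) : Decidable (Pre_get_cats_clos cats) := by
  unfold Pre_get_cats_clos; infer_instance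
def pvWitness_get_cats_clos : (List (Int × List Int)) := ([(0, [1]), (1, [2, 3])])

def Spec_get_cats_clos (cats : List (Int × List Int)) (out : List (Int × List Int)) : Prop := out = get_cats_clos_alt cats
instance (cats : List (Int × List Int)) (out : List (Int × List Int)) : Decidable (Spec_get_cats_clos cats out) := by unfold Spec_get_cats_clos; infer_instance

-- ===== CLAIM (what is proved, stated in full; the proofs are below) =====
def Claim_equal_get_cats_clos : Prop := ∀ (cats : List (Int × List Int)), Dom_get_cats_clos cats → Pre_get_cats_clos cats → Spec_get_cats_clos cats (get_cats_clos cats)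

-- ===== LEMMAS AND PROOFS =====

-- A's inner loop touches only the entry at the fixed key i, appending there the
-- values at all j ≠ i; every other entry (and the key list) is left alone.
lemma pvInner_getD (d : PySem.Dict Int (List Int)) (R : List Int) (i k : Int)
    (cc : PySem.Dict Int (List Int)) :
    (R.foldl (fun cc2 j => if i ≠ j then cc2.modify i [] (fun v => v ++ d.getD j []) else cc2) cc).getD k []
      = if k = i then
          cc.getD k [] ++ ((R.filter (fun j => decide (i ≠ j))).map (fun j => d.getD j [])).flatten
        else cc.getD k [] := by
  induction R generalizing cc with
  | nil => simp
  | cons a t ih =>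
    simp only [List.foldl_cons]
    by_cases hia : i = a
    · rw [if_neg (not_not_intro hia), ih]
      simp [hia]
    · rw [if_pos hia, ih]
      by_cases hk : k = i
      · subst hk
        simp [hia, List.append_assoc]
      · simp [PySem.Dict.getD_modify, hk]

lemma pvInner_keys (d : PySem.Dict Int (List Int)) (R : List Int) (i : Int)
    (cc : PySem.Dict Int (List Int)) (h : cc.contains i = true) :
    (R.foldl (fun cc2 j => if i ≠ j then cc2.modify i [] (fun v => v ++ d.getD j []) else cc2) cc).keys = cc.keys := by
  induction R generalizing cc with
  | nil => rfl
  | cons a t ih =>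
    simp only [List.foldl_cons]
    by_cases hia : i = a
    · rw [if_neg (not_not_intro hia)]
      exact ih cc h
    · rw [if_pos hia]
      have hc2 : (cc.modify i [] (fun v => v ++ d.getD a [])).contains i = true := by
        simp [PySem.Dict.contains_modify]
      have hk2 : (cc.modify i [] (fun v => v ++ d.getD a [])).keys = cc.keys := by
        rw [PySem.Dict.keys_modify]
        exact PySem.Dict.keys_insert_of_contains _ _ h
      rw [ih _ hc2, hk2]

-- Outer loop: in a duplicate-free iteration list, each key k is touched by exactly
-- one outer iteration (the one with i = k).
lemma pvOuter_getD (d : PySem.Dict Int (List Int)) (R : List Int) (l : List Int)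
    (hnd : l.Nodup) (cc : PySem.Dict Int (List Int)) (k : Int) :
    (l.foldl (fun cc i =>
        (R.foldl (fun cc2 j => if i ≠ j then cc2.modify i [] (fun v => v ++ d.getD j []) else cc2) cc)) cc).getD k []
      = if k ∈ l then
          cc.getD k [] ++ ((R.filter (fun j => decide (k ≠ j))).map (fun j => d.getD j [])).flatten
        else cc.getD k [] := by
  induction l generalizing cc with
  | nil => simp
  | cons a t ih =>
    have hnt : t.Nodup := hnd.of_cons
    have hna : a ∉ t := (List.nodup_cons.mp hnd).1
    simp only [List.foldl_cons]
    rw [ih hnt]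
    by_cases hk : k = a
    · subst hk
      rw [if_neg hna, if_pos (by simp), pvInner_getD, if_pos rfl]
    · rw [pvInner_getD, if_neg hk]
      by_cases hmt : k ∈ t
      · rw [if_pos hmt, if_pos (List.mem_cons_of_mem _ hmt)]
      · rw [if_neg hmt, if_neg (by simp [hk, hmt])]

lemma pvOuter_keys (d : PySem.Dict Int (List Int)) (R : List Int) (l : List Int)
    (cc : PySem.Dict Int (List Int)) (h : ∀ i ∈ l, i ∈ cc.keys) :
    (l.foldl (fun cc i =>
        (R.foldl (fun cc2 j => if i ≠ j then cc2.modify i [] (fun v => v ++ d.getD j []) else cc2) cc)) cc).keys = cc.keys := by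
  induction l generalizing cc with
  | nil => rfl
  | cons a t ih =>
    have hca : cc.contains a = true :=
      (PySem.Dict.contains_iff_mem_keys _ _).mpr (h a (by simp))
    have h1 := pvInner_keys d R a cc hca
    simp only [List.foldl_cons]
    rw [ih _ (fun i hi => by rw [h1]; exact h i (by simp [hi])), h1]

-- B's loop: the running offset is the prefix sum of the block lengths.
lemma pvBfold (blocks : List (List Int)) (total : List Int) :
    ∀ (k s : Nat) (acc : List (Int × List Int)),
      ((List.range' s k).foldl
          (fun (st : Nat × List (Int × List Int)) i =>
            (st.1 + (blocks.getD i []).length,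
             st.2 ++ [((i : Int), total.take st.1 ++ total.drop (st.1 + (blocks.getD i []).length))]))
          (((List.range s).map (fun j => (blocks.getD j []).length)).sum, acc)).2
        = acc ++ (List.range' s k).map (fun (i : Nat) =>
            ((i : Int),
             total.take (((List.range i).map (fun j => (blocks.getD j []).length)).sum)
               ++ total.drop ((((List.range i).map (fun j => (blocks.getD j []).length)).sum)
                    + (blocks.getD i []).length))) := by
  intro k
  induction k with
  | zero => intro s acc; simp
  | succ k ih =>
    intro s acc
    rw [List.range'_succ, List.foldl_cons]
    have hoff : (((List.range s).map (fun j => (blocks.getD j []).length)).sum)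
          + (blocks.getD s []).length
        = (((List.range (s+1)).map (fun j => (blocks.getD j []).length)).sum) := by
      rw [List.range_succ]
      simp only [List.map_append, List.map_cons, List.map_nil, List.sum_append,
        List.sum_cons, List.sum_nil, add_zero]
    rw [hoff, ih (s+1)]
    simp only [List.map_cons, List.append_assoc, List.cons_append, List.nil_append]
    rw [← hoff]

-- Filtering the value at position i out of range N keeps exactly the prefix
-- before i and the suffix after i.
lemma pvFilter_range_ne (N i : Nat) (h : i < N) :
    (List.range N).filter (fun j => decide (i ≠ j))
      = (List.range N).take i ++ (List.range N).drop (i + 1) := by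
  have hlen : i < (List.range N).length := by simpa using h
  have hsplit : List.range N = (List.range N).take i ++ i :: (List.range N).drop (i + 1) := by
    conv_lhs => rw [← List.take_append_drop i (List.range N)]
    rw [← List.getElem_cons_drop hlen, List.getElem_range]
  have hnd : ((List.range N).take i ++ i :: (List.range N).drop (i + 1)).Nodup := by
    rw [← hsplit]; exact List.nodup_range
  rcases List.nodup_append.mp hnd with ⟨-, hnd2, hdisj⟩
  have hi_take : i ∉ (List.range N).take i := fun hmem => (hdisj i hmem i (by simp)) rfl
  have hi_drop : i ∉ (List.range N).drop (i + 1) := (List.nodup_cons.mp hnd2).1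
  have h1 : ((List.range N).take i).filter (fun j => decide (i ≠ j)) = (List.range N).take i := by
    apply List.filter_eq_self.mpr
    intro x hx
    simp only [decide_eq_true_eq]
    intro hxi; exact hi_take (hxi ▸ hx)
  have h2 : ((List.range N).drop (i + 1)).filter (fun j => decide (i ≠ j)) = (List.range N).drop (i + 1) := by
    apply List.filter_eq_self.mpr
    intro x hx
    simp only [decide_eq_true_eq]
    intro hxi; exact hi_drop (hxi ▸ hx)
  conv_lhs => rw [hsplit]
  rw [List.filter_append, List.filter_cons, if_neg (by simp), h1, h2]

-- ===== VERDICT (by name: the statement is the Claim_ definition above) =====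
theorem get_cats_clos_spec : Claim_equal_get_cats_clos := by
  intro cats _ _
  unfold Spec_get_cats_clos
  simp only [get_cats_clos, get_cats_clos_alt]
  set d := PySem.Dict.ofList cats with hd
  have hsize : d.size = d.keys.length := by
    simp [PySem.Dict.size, PySem.Dict.keys]
  rw [hsize]
  set N := d.keys.length with hN
  rw [PySem.List.pyRange_zero_natCast N]
  set bf : Nat → List Int := fun (i : Nat) => d.getD (i : Int) [] with hbf
  set blocks := (List.range N).map bf with hblocks
  set total := blocks.flatten with htotal
  set R := (List.range N).map (fun k : Nat => (k : Int)) with hR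
  have hRnd : R.Nodup := by
    rw [hR]
    exact List.nodup_range.map (fun a b hh => by exact_mod_cast hh)
  set cc0 := R.foldl (fun acc i => acc.insert i ([] : List Int)) PySem.Dict.empty with hcc0
  have hitems0 : cc0.items = R.map (fun i => (i, ([] : List Int))) := by
    rw [hcc0]
    have := PySem.Dict.items_foldl_insert_fresh (l := R) (k := fun a => a)
      (v := fun _ => ([] : List Int)) (d := PySem.Dict.empty)
      (by intro a _; simp) (by simpa [List.map_id] using hRnd)
    simpa using this
  have hkeys0 : cc0.keys = R := by
    simp [PySem.Dict.keys, hitems0, Function.comp_def]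
  have hnd0 : cc0.keys.Nodup := by rw [hkeys0]; exact hRnd
  have hg0 : ∀ k ∈ R, cc0.getD k [] = [] := by
    intro k hk
    exact PySem.Dict.getD_of_mem_items cc0
      (by rw [hitems0]; exact List.mem_map.mpr ⟨k, hk, rfl⟩) hnd0 []
  set final := R.foldl (fun cc i =>
      (R.foldl (fun cc2 j => if i ≠ j then cc2.modify i [] (fun v => v ++ d.getD j []) else cc2) cc)) cc0 with hfinal
  have hfk : final.keys = R := by
    rw [hfinal, pvOuter_keys d R R cc0 (fun i hi => by rw [hkeys0]; exact hi), hkeys0]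
  have hfd : ∀ k ∈ R, final.getD k []
      = ((R.filter (fun j => decide (k ≠ j))).map (fun j => d.getD j [])).flatten := by
    intro k hk
    rw [hfinal, pvOuter_getD d R R hRnd cc0 k, if_pos hk, hg0 k hk, List.nil_append]
  -- A's result, elementwise
  have hA : final.items = R.map (fun k =>
      (k, ((R.filter (fun j => decide (k ≠ j))).map (fun j => d.getD j [])).flatten)) := by
    rw [PySem.Dict.items_eq_map_keys final (by rw [hfk]; exact hRnd) [], hfk]
    exact List.map_congr_left (fun k hk => by rw [hfd k hk])
  rw [hA]
  by_cases h2 : N < 2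
  · -- zero or one key: both sides are the keys paired with empty lists
    rw [if_pos h2, hR, List.map_map]
    apply List.map_congr_left
    intro i hi
    have hiN : i < N := List.mem_range.mp hi
    have hN1 : N = 1 := by omega
    have hi0 : i = 0 := by omega
    subst hi0
    rw [hN1] at hR ⊢
    simp [List.range_succ]
  rw [if_neg h2]
  -- B's result, elementwise
  have h0 : ((0 : Nat), ([] : List (Int × List Int)))
      = (((List.range 0).map (fun j => (blocks.getD j []).length)).sum, ([] : List (Int × List Int))) := rfl
  have hB : ((List.range N).foldl
      (fun (st : Nat × List (Int × List Int)) i =>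
        (st.1 + (blocks.getD i []).length,
         st.2 ++ [((i : Int), total.take st.1 ++ total.drop (st.1 + (blocks.getD i []).length))]))
      (0, [])).2
      = (List.range N).map (fun (i : Nat) =>
          ((i : Int),
           total.take (((List.range i).map (fun j => (blocks.getD j []).length)).sum)
             ++ total.drop ((((List.range i).map (fun j => (blocks.getD j []).length)).sum)
                  + (blocks.getD i []).length))) := by
    rw [List.range_eq_range', h0, pvBfold blocks total N 0 [], List.nil_append]
  rw [hB, hR, List.map_map]
  apply List.map_congr_left
  intro i hi
  simp only [Function.comp_apply]
  rw [← hR]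
  have hiN : i < N := List.mem_range.mp hi
  -- shared facts about blocks and offsets
  have hbd : ∀ j, j < N → blocks.getD j [] = bf j := by
    intro j hj
    rw [hblocks]
    exact PySem.List.getD_map_range bf N j [] hj
  have hOff : ∀ t, t ≤ N →
      ((List.range t).map (fun j => (blocks.getD j []).length)).sum = (blocks.take t).flatten.length := by
    intro t ht
    rw [List.length_flatten]
    have h1 : blocks.take t = (List.range t).map bf := by
      rw [hblocks, ← List.map_take, List.take_range, Nat.min_eq_left ht]
    rw [h1, List.map_map]
    refine congrArg List.sum (List.map_congr_left (fun j hj => ?_))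
    rw [hbd j (lt_of_lt_of_le (List.mem_range.mp hj) ht)]
    rfl
  have hsucc : (((List.range (i+1)).map (fun j => (blocks.getD j []).length)).sum)
      = (((List.range i).map (fun j => (blocks.getD j []).length)).sum) + (blocks.getD i []).length := by
    rw [List.range_succ]
    simp only [List.map_append, List.map_cons, List.map_nil, List.sum_append,
      List.sum_cons, List.sum_nil, add_zero]
  have hsplit1 : total = (blocks.take i).flatten ++ (blocks.drop i).flatten := by
    rw [htotal, ← List.flatten_append, List.take_append_drop]
  have hsplit2 : total = (blocks.take (i+1)).flatten ++ (blocks.drop (i+1)).flatten := by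
    rw [htotal, ← List.flatten_append, List.take_append_drop]
  have h_take : total.take (((List.range i).map (fun j => (blocks.getD j []).length)).sum)
      = (blocks.take i).flatten := by
    rw [hOff i hiN.le]
    conv_lhs => rw [hsplit1]
    exact List.take_left
  have h_drop : total.drop ((((List.range i).map (fun j => (blocks.getD j []).length)).sum)
        + (blocks.getD i []).length)
      = (blocks.drop (i+1)).flatten := by
    rw [← hsucc, hOff (i+1) hiN]
    conv_lhs => rw [hsplit2]
    exact List.drop_left
  rw [h_take, h_drop]
  -- A's per-key value equals B's two flattened pieces
  have hfilt : (R.filter (fun j => decide ((i : Int) ≠ j)))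
      = ((List.range N).filter (fun j => decide (i ≠ j))).map (fun k : Nat => (k : Int)) := by
    rw [hR, List.filter_map]
    have hp : ((fun j => decide ((i : Int) ≠ j)) ∘ (fun k : Nat => (k : Int)))
        = (fun j : Nat => decide (i ≠ j)) := by
      funext j
      simp
    rw [hp]
  have hgc : ((fun j => d.getD j []) ∘ (fun k : Nat => (k : Int))) = bf := rfl
  rw [hfilt, List.map_map, hgc, pvFilter_range_ne N i hiN, List.map_append,
    List.flatten_append, List.map_take, List.map_drop, ← hblocks]
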